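-- pv_equiv track=rewrite | github.com/zixuan-x/algorithms | codesignal/Tests/coolFeatures.py | coolFeatures
-- ===== SOURCE A (Python) =====
-- from typing import List
-- from collections import Counter
--
-- def coolFeatures(a: List[int], b: List[int], queries: List[List[int]]):
--     a = Counter(a)
--     result = []
--     for query in queries:
--         if len(query) == 3: # update
--             _, index, value = query
--             b[index] = value
--         else:               # count
--             count = 0
--             target = query[1]
--             for num in b:
--                 count += a.get(target - num, 0)
--             result.append(count)
--     return result
-- ===== SOURCE B (Python) =====
-- from typing import List
-- from collections import Counter
--
-- def coolFeatures(a: List[int], b: List[int], queries: List[List[int]]):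
--     # Alternative decomposition: a live frequency map of b; count queries scan the distinct
--     # values of a instead of rescanning all of b (mutates b in place like A).
--     cntA = Counter(a)
--     cntB = Counter(b)
--     result = []
--     for query in queries:
--         if len(query) == 3:  # update
--             _, index, value = query
--             old = b[index]
--             cntB[old] -= 1
--             if cntB[old] == 0:
--                 del cntB[old]
--             b[index] = value
--             cntB[value] += 1
--         else:                # count
--             target = query[1]
--             count = 0
--             for v, f in cntA.items():
--                 count += f * cntB.get(target - v, 0)
--             result.append(count)
--     return result
-- ===== Notes on version B (the rewrite author's own statement) =====
-- stated objective: alternative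
-- what changed: Instead of rescanning all of b for every count query, B keeps a live Counter of b (updated incrementally on each update query) and answers a count query by scanning the distinct values of a, multiplying each frequency in a by the matching frequency in b.
import Mathlib
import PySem

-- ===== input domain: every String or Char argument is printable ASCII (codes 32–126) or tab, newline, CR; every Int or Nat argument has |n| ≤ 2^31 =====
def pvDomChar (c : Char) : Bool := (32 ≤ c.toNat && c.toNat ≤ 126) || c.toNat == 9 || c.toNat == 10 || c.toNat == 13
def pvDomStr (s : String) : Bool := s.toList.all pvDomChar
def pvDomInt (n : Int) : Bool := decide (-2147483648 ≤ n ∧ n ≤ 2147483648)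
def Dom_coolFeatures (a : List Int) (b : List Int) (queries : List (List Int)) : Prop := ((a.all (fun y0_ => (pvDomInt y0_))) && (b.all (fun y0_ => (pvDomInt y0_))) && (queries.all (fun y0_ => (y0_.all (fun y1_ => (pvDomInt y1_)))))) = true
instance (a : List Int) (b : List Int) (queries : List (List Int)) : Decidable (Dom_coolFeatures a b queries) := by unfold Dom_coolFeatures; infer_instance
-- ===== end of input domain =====

-- B answers each count query by scanning the distinct values of `a` against a live
-- frequency map of `b` maintained across updates, instead of rescanning all of `b`
-- (a different decomposition of the same work); both versions mutate the Python list
-- `b` in place identically (equivalence here is about the returned list).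

-- ===== PORT A =====
-- loop body of A's 'for query in queries', state = (b, result)
def stepA (cnt : PySem.Dict Int Int) (st : List Int × List Int) (q : List Int) :
    List Int × List Int :=
  if q.length = 3 then
    -- _, index, value = query; b[index] = value
    (PySem.List.pySetD st.1 (PySem.List.pyGetD q 1 0) (PySem.List.pyGetD q 2 0), st.2)
  else
    -- target = query[1]; for num in b: count += a.get(target - num, 0)
    (st.1,
     st.2 ++ [st.1.foldl (fun c num => c + cnt.getD (PySem.List.pyGetD q 1 0 - num) 0) 0])

def coolFeatures (a : List Int) (b : List Int) (queries : List (List Int)) : List Int :=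
  (queries.foldl (stepA (PySem.Dict.counter a)) (b, [])).2

-- ===== PORT B =====
-- loop body of B's 'for query in queries', state = (b, cntB, result)
def stepB (cntA : PySem.Dict Int Int) (st : List Int × PySem.Dict Int Int × List Int)
    (q : List Int) : List Int × PySem.Dict Int Int × List Int :=
  if q.length = 3 then
    let index := PySem.List.pyGetD q 1 0
    let value := PySem.List.pyGetD q 2 0
    let old := PySem.List.pyGetD st.1 index 0          -- old = b[index]
    let d1 := st.2.1.modify old 0 (· - 1)              -- cntB[old] -= 1
    let d2 := if d1.getD old 0 = 0 then d1.erase old else d1   -- if cntB[old]==0: del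
    (PySem.List.pySetD st.1 index value,               -- b[index] = value
     d2.modify value 0 (· + 1),                        -- cntB[value] += 1
     st.2.2)
  else
    let target := PySem.List.pyGetD q 1 0
    -- for v, f in cntA.items(): count += f * cntB.get(target - v, 0)
    (st.1, st.2.1,
     st.2.2 ++ [cntA.items.foldl (fun c p => c + p.2 * st.2.1.getD (target - p.1) 0) 0])

def coolFeatures_alt (a : List Int) (b : List Int) (queries : List (List Int)) : List Int :=
  (queries.foldl (stepB (PySem.Dict.counter a)) (b, PySem.Dict.counter b, [])).2.2

-- ===== PRECONDITION & SPEC =====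
-- Pre_ excludes exactly the inputs where A raises IndexError: an update query whose
-- index is out of range for b, or a non-update query with fewer than 2 elements.
def Pre_coolFeatures (a : List Int) (b : List Int) (queries : List (List Int)) : Prop :=
  ∀ q ∈ queries,
    (q.length = 3 → PySem.Raise.InRange b.length (PySem.List.pyGetD q 1 0)) ∧
    (q.length ≠ 3 → 2 ≤ q.length)
instance (a : List Int) (b : List Int) (queries : List (List Int)) :
    Decidable (Pre_coolFeatures a b queries) := by unfold Pre_coolFeatures; infer_instance

def pvWitness_coolFeatures : List Int × List Int × List (List Int) :=
  ([1, 2, 1], [3, 2], [[1, 3], [0, 0, 4], [1, 5]])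

def Spec_coolFeatures (a : List Int) (b : List Int) (queries : List (List Int)) (out : List Int) : Prop := out = coolFeatures_alt a b queries
instance (a : List Int) (b : List Int) (queries : List (List Int)) (out : List Int) : Decidable (Spec_coolFeatures a b queries out) := by unfold Spec_coolFeatures; infer_instance

-- ===== CLAIM (what is proved, stated in full; the proofs are below) =====
def Claim_equal_coolFeatures : Prop := ∀ (a : List Int) (b : List Int) (queries : List (List Int)), Dom_coolFeatures a b queries → Pre_coolFeatures a b queries → Spec_coolFeatures a b queries (coolFeatures a b queries)

-- ===== LEMMAS AND PROOFS =====

-- cntB is exactly the multiset of the current b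
def InvCnt (b : List Int) (d : PySem.Dict Int Int) : Prop :=
  ∀ x : Int, d.getD x 0 = (b.count x : Int)

theorem getD_erase_dict (d : PySem.Dict Int Int) (k x dflt : Int) :
    (d.erase k).getD x dflt = if x = k then dflt else d.getD x dflt := by
  obtain ⟨l⟩ := d
  by_cases hx : x = k
  · subst hx
    have hnone : List.find? (fun p => p.1 == x) (l.filter (fun p => !(p.1 == x))) = none := by
      rw [List.find?_eq_none]
      intro p hp
      simpa using (List.mem_filter.mp hp).2
    simp [PySem.Dict.erase, PySem.Dict.getD, PySem.Dict.get?, hnone]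
  · have hsame : List.find? (fun p => p.1 == x) (l.filter (fun p => !(p.1 == k)))
        = List.find? (fun p => p.1 == x) l := by
      induction l with
      | nil => rfl
      | cons p rest ih =>
        by_cases hk : p.1 = k
        · rw [List.filter_cons_of_neg (by simp [hk]), ih,
            List.find?_cons_of_neg (by simp [hk]; exact fun h => hx h.symm)]
        · rw [List.filter_cons_of_pos (by simp [hk])]
          by_cases hpx : p.1 = x
          · rw [List.find?_cons_of_pos (by simp [hpx]), List.find?_cons_of_pos (by simp [hpx])]
          · rw [List.find?_cons_of_neg (by simp [hpx]), List.find?_cons_of_neg (by simp [hpx]), ih]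
    simp [PySem.Dict.erase, PySem.Dict.getD, PySem.Dict.get?, hsame, hx]

theorem inv_counter (b : List Int) : InvCnt b (PySem.Dict.counter b) := by
  intro x; exact PySem.Dict.getD_counter b x

theorem idx_norm (xs : List Int) (i v dflt : Int) (h : PySem.Raise.InRange xs.length i) :
    ∃ n : Nat, n < xs.length ∧ PySem.List.pySetD xs i v = xs.set n v ∧
      PySem.List.pyGetD xs i dflt = xs.getD n dflt := by
  obtain ⟨h1, h2⟩ := h
  by_cases hi : 0 ≤ i
  · refine ⟨i.toNat, by omega, ?_, ?_⟩
    · exact PySem.List.pySetD_of_nonneg xs v hi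
    · simp [PySem.List.pyGetD, PySem.List.pyGet?, PySem.List.pyIdx?, hi, h2, List.getD]
  · refine ⟨xs.length - (-i).toNat, by omega, ?_, ?_⟩
    · simp [PySem.List.pySetD, PySem.List.pySet?, PySem.List.pyIdx?, hi, h1]
    · simp [PySem.List.pyGetD, PySem.List.pyGet?, PySem.List.pyIdx?, hi, h1, List.getD]

theorem inv_update (bb : List Int) (d : PySem.Dict Int Int) (i v : Int)
    (h : PySem.Raise.InRange bb.length i) (hinv : InvCnt bb d) :
    InvCnt (PySem.List.pySetD bb i v)
      ((if (d.modify (PySem.List.pyGetD bb i 0) 0 (· - 1)).getD (PySem.List.pyGetD bb i 0) 0 = 0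
        then (d.modify (PySem.List.pyGetD bb i 0) 0 (· - 1)).erase (PySem.List.pyGetD bb i 0)
        else d.modify (PySem.List.pyGetD bb i 0) 0 (· - 1)).modify v 0 (· + 1)) := by
  obtain ⟨n, hn, hset, hget⟩ := idx_norm bb i v 0 h
  intro x
  rw [hset, hget]
  have hold : bb.getD n 0 = bb[n] := List.getD_eq_getElem bb 0 hn
  have hmem : bb[n] ∈ bb := List.getElem_mem hn
  have hpos : 0 < bb.count bb[n] := List.count_pos_iff.mpr hmem
  have hcs := List.count_set (a := v) (b := x) (l := bb) (i := n) hn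
  rw [hold]
  have hd1 : ∀ y : Int, (d.modify bb[n] 0 (· - 1)).getD y 0
      = if y = bb[n] then (bb.count bb[n] : Int) - 1 else (bb.count y : Int) := by
    intro y
    rw [PySem.Dict.getD_modify]
    split_ifs with hy <;> simp [hinv bb[n], hinv y]
  have hd2 : ∀ y : Int,
      ((if (d.modify bb[n] 0 (· - 1)).getD bb[n] 0 = 0
        then (d.modify bb[n] 0 (· - 1)).erase bb[n]
        else d.modify bb[n] 0 (· - 1)).getD y 0)
      = (d.modify bb[n] 0 (· - 1)).getD y 0 := by
    intro y
    split_ifs with hz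
    · rw [getD_erase_dict]
      by_cases hy : y = bb[n]
      · rw [if_pos hy, hy, hz]
      · rw [if_neg hy]
    · rfl
  rw [PySem.Dict.getD_modify, hd2, hd2, hd1, hd1, hcs]
  simp only [beq_iff_eq]
  by_cases hxv : x = v
  · subst hxv
    by_cases hxo : x = bb[n]
    · subst hxo
      simp
    · rw [if_pos rfl, if_neg hxo, if_neg (fun hc : bb[n] = x => hxo hc.symm), if_pos rfl]
      omega
  · by_cases hxo : x = bb[n]
    · subst hxo
      rw [if_neg hxv, if_pos rfl, if_pos rfl, if_neg (fun hc : v = bb[n] => hxv hc.symm)]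
      omega
    · rw [if_neg hxv, if_neg hxo, if_neg (fun hc : bb[n] = x => hxo hc.symm),
        if_neg (fun hc : v = x => hxv hc.symm)]
      omega

theorem sum_ite_nodup (s : List Int) (g : Int → Int) (x : Int) (hnd : s.Nodup) :
    (s.map (fun v => if v = x then g v else 0)).sum = if x ∈ s then g x else 0 := by
  induction s with
  | nil => simp
  | cons hd tl ih =>
    rcases List.nodup_cons.mp hnd with ⟨hhd, htl⟩
    by_cases hx : hd = x
    · subst hx
      have : (tl.map (fun v => if v = hd then g v else 0)).sum = 0 := by
        rw [ih htl, if_neg hhd]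
      simp [this]
    · simp [hx, ih htl, Ne.symm hx]

theorem key_count (a bb : List Int) (t : Int) :
    (bb.map (fun num => (a.count (t - num) : Int))).sum
      = ((PySem.Set.ofList a).map
          (fun v => (a.count v : Int) * (bb.count (t - v) : Int))).sum := by
  induction bb with
  | nil => simp
  | cons num bb ih =>
    have hpt : ∀ v : Int, (a.count v : Int) * (((num :: bb).count (t - v) : Nat) : Int)
        = (a.count v : Int) * (bb.count (t - v) : Int)
          + (if v = t - num then (a.count v : Int) else 0) := by
      intro v
      rw [List.count_cons]
      by_cases hv : v = t - num
      · simp [hv]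
        ring
      · have : (num == t - v) = false := by
          simp only [beq_eq_false_iff_ne, ne_eq]; omega
        simp [this, hv]
    calc (List.map (fun num => (a.count (t - num) : Int)) (num :: bb)).sum
        = (a.count (t - num) : Int)
            + (List.map (fun num => (a.count (t - num) : Int)) bb).sum := by
          simp
      _ = (if (t - num) ∈ PySem.Set.ofList a then (a.count (t - num) : Int) else 0)
            + ((PySem.Set.ofList a).map
                (fun v => (a.count v : Int) * (bb.count (t - v) : Int))).sum := by
          rw [ih]
          congr 1
          by_cases hm : (t - num) ∈ a
          · rw [if_pos ((PySem.Set.mem_ofList a _).mpr hm)]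
          · rw [if_neg (fun hc => hm ((PySem.Set.mem_ofList a _).mp hc))]
            simp [List.count_eq_zero.mpr hm]
      _ = _ := by
          rw [List.map_congr_left (fun v _ => hpt v), PySem.List.sum_map_add_int,
            sum_ite_nodup _ _ _ (PySem.Set.nodup_ofList a)]
          ring

theorem count_query_eq (a bb : List Int) (d : PySem.Dict Int Int) (t : Int)
    (hinv : InvCnt bb d) :
    bb.foldl (fun c num => c + (PySem.Dict.counter a).getD (t - num) 0) 0
      = (PySem.Dict.counter a).items.foldl (fun c p => c + p.2 * d.getD (t - p.1) 0) 0 := by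
  rw [PySem.List.foldl_add, PySem.List.foldl_add]
  simp only [zero_add, PySem.Dict.items_counter, List.map_map]
  have hL : List.map (fun num => (PySem.Dict.counter a).getD (t - num) 0) bb
      = List.map (fun num => (a.count (t - num) : Int)) bb :=
    List.map_congr_left (fun num _ => PySem.Dict.getD_counter a (t - num))
  have hR : List.map ((fun p : Int × Int => p.2 * d.getD (t - p.1) 0)
        ∘ fun k => (k, (a.count k : Int))) (PySem.Set.ofList a)
      = List.map (fun v => (a.count v : Int) * (bb.count (t - v) : Int))
          (PySem.Set.ofList a) :=
    List.map_congr_left (fun v _ => by simp [hinv (t - v)])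
  rw [hL, hR, key_count a bb t]

theorem loop_eq (queries : List (List Int)) (a : List Int) :
    ∀ (bb : List Int) (d : PySem.Dict Int Int) (res : List Int),
    (∀ q ∈ queries, q.length = 3 → PySem.Raise.InRange bb.length (PySem.List.pyGetD q 1 0)) →
    InvCnt bb d →
    (queries.foldl (stepA (PySem.Dict.counter a)) (bb, res)).2
      = (queries.foldl (stepB (PySem.Dict.counter a)) (bb, d, res)).2.2 := by
  induction queries with
  | nil => intro bb d res _ _; rfl
  | cons q qs ih =>
    intro bb d res hpre hinv
    simp only [List.foldl_cons]
    by_cases h3 : q.length = 3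
    · have hr := hpre q List.mem_cons_self h3
      simp only [stepA, stepB, if_pos h3]
      apply ih
      · intro q' hq' h3'
        have := hpre q' (List.mem_cons_of_mem _ hq') h3'
        rwa [PySem.List.length_pySetD]
      · exact inv_update bb d _ _ hr hinv
    · simp only [stepA, stepB, if_neg h3]
      rw [count_query_eq a bb d _ hinv]
      exact ih bb d _ (fun q' hq' h3' => hpre q' (List.mem_cons_of_mem _ hq') h3') hinv

-- ===== VERDICT (by name: the statement is the Claim_ definition above) =====
theorem coolFeatures_spec : Claim_equal_coolFeatures := by
  intro a b queries _ hpre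
  unfold Spec_coolFeatures coolFeatures coolFeatures_alt
  exact loop_eq queries a b (PySem.Dict.counter b) []
    (fun q hq h3 => (hpre q hq).1 h3) (inv_counter b)
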